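-- pv_equiv track=rewrite | github.com/Lesz-Xi/crucible | Graph-Theory-Networks/neural_topology_audit.py | ring_lattice_graph
-- ===== SOURCE A (Python) =====
-- from typing import Dict, Iterable, List, Sequence, Tuple
--
-- class AuditInputError(ValueError):
--     """Raised when input SCM/dataset schema is malformed."""
--
-- def empty_graph(n: int) -> Dict[int, set[int]]:
--     return {i: set() for i in range(n)}
--
-- def add_edge(adj: Dict[int, set[int]], u: int, v: int) -> None:
--     if u == v:
--         return
--     adj[u].add(v)
--     adj[v].add(u)
--
-- def ring_lattice_graph(n: int, k: int) -> Dict[int, set[int]]: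
--     if k % 2 != 0:
--         raise AuditInputError("k must be even for ring lattice")
--     adj = empty_graph(n)
--     half = k // 2
--     for u in range(n):
--         for d in range(1, half + 1):
--             v = (u + d) % n
--             add_edge(adj, u, v)
--     return adj
-- ===== SOURCE B (Python) =====
-- class AuditInputError(ValueError):
--     """Raised when input SCM/dataset schema is malformed."""
--
-- def ring_lattice_graph(n, k):
--     if k % 2 != 0:
--         raise AuditInputError("k must be even for ring lattice")
--     half = k // 2
--     adj = {}
--     for i in range(n):
--         s = set()
--         for u in range(max(0, i - half), i):        # lower neighbours i-half..i-1
--             s.add(u)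
--         for d in range(1, half + 1):                # forward neighbours (i+d) mod n
--             v = (i + d) % n
--             if v != i:
--                 s.add(v)
--         for u in range(max(i + 1, n + i - half), n):  # wrapped lower neighbours
--             s.add(u)
--         adj[i] = s
--     return adj
-- ===== Notes on version B (the rewrite author's own statement) =====
-- stated objective: alternative
-- what changed: Each node's neighbourhood is computed independently from closed-form index ranges (lower, forward and wrapped-lower neighbours), with no shared mutable dict and no symmetric add_edge helper; symmetry is explicit instead of emergent.
import Mathlib
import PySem

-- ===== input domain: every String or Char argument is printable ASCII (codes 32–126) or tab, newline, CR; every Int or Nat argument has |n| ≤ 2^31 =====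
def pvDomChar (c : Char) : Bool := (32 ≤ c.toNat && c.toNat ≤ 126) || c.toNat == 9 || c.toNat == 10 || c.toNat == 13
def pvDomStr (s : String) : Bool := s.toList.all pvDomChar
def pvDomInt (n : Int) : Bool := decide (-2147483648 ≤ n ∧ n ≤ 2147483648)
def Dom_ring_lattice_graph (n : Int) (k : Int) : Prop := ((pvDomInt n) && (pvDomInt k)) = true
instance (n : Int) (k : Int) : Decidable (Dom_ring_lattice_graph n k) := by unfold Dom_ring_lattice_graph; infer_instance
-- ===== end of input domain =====

-- B computes each node's neighbour set independently from closed-form index ranges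
-- instead of threading symmetric add_edge mutations through a shared dict (objective: alternative).


-- ===== PORT A =====
-- add_edge: keys u, v are always present when called (u, v ∈ range n), so Dict.modify
-- with default [] is exact (Python's adj[u].add(v) mutates the existing set in place).
def pvAddEdge (adj : PySem.Dict Int (PySem.Set Int)) (u v : Int) : PySem.Dict Int (PySem.Set Int) :=
  if u = v then adj
  else (adj.modify u [] (fun s => PySem.Set.add s v)).modify v [] (fun s => PySem.Set.add s u)

-- on odd k the Python raises AuditInputError (excluded by Pre_); the port returns [] there
def ring_lattice_graph (n : Int) (k : Int) : List (Int × List Int) :=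
  if PySem.Int.mod k 2 ≠ 0 then []
  else  -- adj = empty_graph(n), half = k // 2, then the double edge loop, returned as items
    ((PySem.List.pyRange 0 n 1).foldl (fun adj u =>
        (PySem.List.pyRange 1 (PySem.Int.floordiv k 2 + 1) 1).foldl (fun adj d =>
          pvAddEdge adj u (PySem.Int.mod (u + d) n)) adj)
      ((PySem.List.pyRange 0 n 1).foldl
        (fun d i => d.insert i PySem.Set.empty) PySem.Dict.empty)).items

-- ===== PORT B =====
-- the loop body of B that builds node i's set s (three add loops, in Source B's order)
def pvNbrs (n half i : Int) : PySem.Set Int :=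
  let s1 := (PySem.List.pyRange (max 0 (i - half)) i 1).foldl
    (fun s u => PySem.Set.add s u) PySem.Set.empty
  let s2 := (PySem.List.pyRange 1 (half + 1) 1).foldl (fun s d =>
    let v := PySem.Int.mod (i + d) n
    if v ≠ i then PySem.Set.add s v else s) s1
  (PySem.List.pyRange (max (i + 1) (n + i - half)) n 1).foldl
    (fun s u => PySem.Set.add s u) s2

def ring_lattice_graph_alt (n : Int) (k : Int) : List (Int × List Int) :=
  if PySem.Int.mod k 2 ≠ 0 then []
  else
    ((PySem.List.pyRange 0 n 1).foldl (fun adj i =>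
      adj.insert i (pvNbrs n (PySem.Int.floordiv k 2) i)) PySem.Dict.empty).items

-- ===== PRECONDITION & SPEC =====
-- Pre_ excludes exactly the odd k, on which the Python A raises AuditInputError.
def Pre_ring_lattice_graph (n : Int) (k : Int) : Prop := PySem.Int.mod k 2 = 0
instance (n : Int) (k : Int) : Decidable (Pre_ring_lattice_graph n k) := by
  unfold Pre_ring_lattice_graph; infer_instance

def pvWitness_ring_lattice_graph : Int × Int := (6, 4)

def Spec_ring_lattice_graph (n : Int) (k : Int) (out : List (Int × List Int)) : Prop := out = ring_lattice_graph_alt n k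
instance (n : Int) (k : Int) (out : List (Int × List Int)) : Decidable (Spec_ring_lattice_graph n k out) := by unfold Spec_ring_lattice_graph; infer_instance

-- ===== CLAIM (what is proved, stated in full; the proofs are below) =====
def Claim_equal_ring_lattice_graph : Prop := ∀ (n : Int) (k : Int), Dom_ring_lattice_graph n k → Pre_ring_lattice_graph n k → Spec_ring_lattice_graph n k (ring_lattice_graph n k)

-- ===== LEMMAS AND PROOFS =====

-- adding an element twice is adding it once
theorem pv_add_add (s : PySem.Set Int) (u : Int) :
    PySem.Set.add (PySem.Set.add s u) u = PySem.Set.add s u := by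
  simp [PySem.Set.add, PySem.Set.contains]
  split_ifs with h <;> simp [h]

-- a fold that conditionally adds the same element u adds it iff some list element passes
theorem pv_condAddFold (l : List Int) (P : Int → Prop) [DecidablePred P] (u : Int)
    (s : PySem.Set Int) :
    l.foldl (fun s d => if P d then PySem.Set.add s u else s) s
      = if ∃ d ∈ l, P d then PySem.Set.add s u else s := by
  induction l generalizing s with
  | nil => simp
  | cons hd tl ih =>
    simp only [List.foldl_cons]
    by_cases h : P hd
    · rw [if_pos h, ih]
      by_cases h2 : ∃ d ∈ tl, P d
      · rw [if_pos h2, if_pos ⟨hd, by simp [h]⟩, pv_add_add]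
      · rw [if_neg h2, if_pos ⟨hd, by simp [h]⟩]
    · rw [if_neg h, ih]
      by_cases h2 : ∃ d ∈ tl, P d
      · rw [if_pos h2, if_pos (by obtain ⟨d, hd1, hd2⟩ := h2; exact ⟨d, by simp [hd1], hd2⟩)]
      · rw [if_neg h2, if_neg (by rintro ⟨d, hd1, hd2⟩; rcases List.mem_cons.mp hd1 with rfl | hm; exact h hd2; exact h2 ⟨d, hm, hd2⟩)]

-- a conditional-add fold that never fires is the identity
theorem pv_skipFold (l : List Int) (c : Int) (s : PySem.Set Int)
    (h : ∀ u ∈ l, ¬ (c ≤ u)) :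
    l.foldl (fun s u => if c ≤ u then PySem.Set.add s u else s) s = s := by
  induction l generalizing s with
  | nil => simp
  | cons x tl ih =>
    simp only [List.foldl_cons, if_neg (h x (by simp))]
    exact ih _ (fun u hu => h u (by simp [hu]))

-- conditional add over a range = unconditional add over the clipped range
theorem pv_rangeCondAdd (a b c : Int) (s : PySem.Set Int) :
    (PySem.List.pyRange a b 1).foldl (fun s u => if c ≤ u then PySem.Set.add s u else s) s
      = (PySem.List.pyRange (max a c) b 1).foldl (fun s u => PySem.Set.add s u) s := by
  by_cases hca : c ≤ a
  · rw [max_eq_left hca]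
    apply PySem.List.foldl_congr_mem
    intro acc x hx
    rw [if_pos]
    have := (PySem.List.mem_pyRange_one).mp hx
    omega
  · rw [max_eq_right (by omega)]
    by_cases hcb : c ≤ b
    · rw [PySem.List.pyRange_one_append a c b (by omega) hcb, List.foldl_append]
      rw [pv_skipFold (PySem.List.pyRange a c 1) c s
        (by intro u hu; have := (PySem.List.mem_pyRange_one).mp hu; omega)]
      apply PySem.List.foldl_congr_mem
      intro acc x hx
      exact if_pos ((PySem.List.mem_pyRange_one).mp hx).1
    · rw [PySem.List.pyRange_one_eq_nil (by omega : b ≤ c), List.foldl_nil]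
      exact pv_skipFold _ _ _ (by intro u hu; have := (PySem.List.mem_pyRange_one).mp hu; omega)

-- pointwise getD through a fold of dict steps
theorem pv_fold_getD {α : Type} (i : Int) (l : List α)
    (step : PySem.Dict Int (PySem.Set Int) → α → PySem.Dict Int (PySem.Set Int))
    (p : PySem.Set Int → α → PySem.Set Int)
    (h : ∀ dd x, x ∈ l → (step dd x).getD i [] = p (dd.getD i []) x) :
    ∀ d : PySem.Dict Int (PySem.Set Int),
      (l.foldl step d).getD i [] = l.foldl p (d.getD i []) := by
  induction l with
  | nil => simp
  | cons x tl ih =>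
    intro d
    simp only [List.foldl_cons]
    rw [ih (fun dd y hy => h dd y (by simp [hy])), h d x (by simp)]

-- keys invariant through a fold of dict steps
theorem pv_fold_keys {α : Type} (K : List Int) (l : List α)
    (step : PySem.Dict Int (PySem.Set Int) → α → PySem.Dict Int (PySem.Set Int))
    (h : ∀ dd x, x ∈ l → dd.keys = K → (step dd x).keys = K) :
    ∀ d : PySem.Dict Int (PySem.Set Int), d.keys = K → (l.foldl step d).keys = K := by
  induction l with
  | nil => intro d hK; simpa using hK
  | cons x tl ih =>
    intro d hK
    simp only [List.foldl_cons]
    exact ih (fun dd y hy => h dd y (by simp [hy])) _ (h d x (by simp) hK)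

-- getD through pvAddEdge, expressed as a function of the value at i only
theorem pv_getD_addEdge (adj : PySem.Dict Int (PySem.Set Int)) (i u v : Int) :
    (pvAddEdge adj u v).getD i []
      = (if u = v then adj.getD i []
         else if i = v then PySem.Set.add (adj.getD i []) u
         else if i = u then PySem.Set.add (adj.getD i []) v
         else adj.getD i []) := by
  unfold pvAddEdge
  by_cases huv : u = v
  · simp [huv]
  · rw [if_neg huv, if_neg huv]
    rw [PySem.Dict.getD_modify]
    by_cases hiv : i = v
    · rw [if_pos hiv, if_pos hiv, PySem.Dict.getD_modify, if_neg (by omega), hiv]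
    · rw [if_neg hiv, if_neg hiv, PySem.Dict.getD_modify]
      by_cases hiu : i = u
      · rw [if_pos hiu, if_pos hiu, hiu]
      · rw [if_neg hiu, if_neg hiu]

-- keys through pvAddEdge
theorem pv_keys_addEdge (adj : PySem.Dict Int (PySem.Set Int)) (u v : Int)
    (hu : u ∈ adj.keys) (hv : v ∈ adj.keys) :
    (pvAddEdge adj u v).keys = adj.keys := by
  unfold pvAddEdge
  by_cases huv : u = v
  · simp [huv]
  · rw [if_neg huv, PySem.Dict.keys_modify,
      PySem.Dict.keys_insert_of_contains _ _ (by
        rw [PySem.Dict.contains_modify]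
        simp [(PySem.Dict.contains_iff_mem_keys adj v).mpr hv]),
      PySem.Dict.keys_modify,
      PySem.Dict.keys_insert_of_contains _ _ ((PySem.Dict.contains_iff_mem_keys adj u).mpr hu)]

-- the inner loop of A, at a row u ≠ i, adds u exactly when u is a lattice neighbour of i
theorem pv_inner_ne (n half i u : Int) (hn : 0 < n) (hi0 : 0 ≤ i) (hin : i < n)
    (hu0 : 0 ≤ u) (hun : u < n) (hne : u ≠ i) (s : PySem.Set Int) :
    (PySem.List.pyRange 1 (half + 1) 1).foldl (fun s d =>
        let v := PySem.Int.mod (u + d) n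
        if u = v then s else if i = v then PySem.Set.add s u
        else if i = u then PySem.Set.add s v else s) s
      = if (if u < i then i - u else n + i - u) ≤ half then PySem.Set.add s u else s := by
  set C : Int := if u < i then i - u else n + i - u with hC
  have hC1 : 1 ≤ C := by rw [hC]; split_ifs <;> omega
  have hCn : C < n := by rw [hC]; split_ifs <;> omega
  have hmodC : PySem.Int.mod (u + C) n = i := by
    rw [PySem.Int.mod_eq_emod_of_pos hn, hC]
    split_ifs with h
    · rw [show u + (i - u) = i by ring]
      exact Int.emod_eq_of_lt hi0 hin
    · rw [show u + (n + i - u) = i + n * 1 by ring, Int.add_mul_emod_self_left]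
      exact Int.emod_eq_of_lt hi0 hin
  have hcongr : (PySem.List.pyRange 1 (half + 1) 1).foldl (fun s d =>
        let v := PySem.Int.mod (u + d) n
        if u = v then s else if i = v then PySem.Set.add s u
        else if i = u then PySem.Set.add s v else s) s
      = (PySem.List.pyRange 1 (half + 1) 1).foldl (fun s d =>
          if PySem.Int.mod (u + d) n = i then PySem.Set.add s u else s) s := by
    apply PySem.List.foldl_congr_mem
    intro acc d _
    by_cases h : PySem.Int.mod (u + d) n = i
    · have h1 : ¬ (u = PySem.Int.mod (u + d) n) := by rw [h]; exact hne
      simp only []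
      rw [if_neg h1, if_pos h.symm, if_pos h]
    · simp only []
      by_cases huv : u = PySem.Int.mod (u + d) n
      · rw [if_pos huv, if_neg h]
      · rw [if_neg huv, if_neg (fun hh => h hh.symm), if_neg (fun hh => hne hh.symm), if_neg h]
  rw [hcongr, pv_condAddFold]
  have hiff : (∃ d ∈ PySem.List.pyRange 1 (half + 1) 1, PySem.Int.mod (u + d) n = i) ↔ C ≤ half := by
    constructor
    · rintro ⟨d, hdmem, hdeq⟩
      obtain ⟨hd1, hd2⟩ := (PySem.List.mem_pyRange_one).mp hdmem
      rw [PySem.Int.mod_eq_emod_of_pos hn] at hdeq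
      rw [PySem.Int.mod_eq_emod_of_pos hn] at hmodC
      have hdvd : n ∣ (d - C) := by
        apply Int.dvd_of_emod_eq_zero
        have heq : (d - C) % n = ((u + d) - (u + C)) % n := by ring_nf
        rw [heq, Int.sub_emod, hdeq, hmodC, sub_self, Int.zero_emod]
      obtain ⟨t, ht⟩ := hdvd
      by_cases hle : 0 ≤ t
      · have : 0 ≤ n * t := mul_nonneg hn.le hle
        omega
      · have : n * t ≤ n * (-1) := by
          apply mul_le_mul_of_nonneg_left (by omega) hn.le
        omega
    · intro hle
      exact ⟨C, (PySem.List.mem_pyRange_one).mpr ⟨hC1, by omega⟩, hmodC⟩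
  rw [if_congr hiff rfl rfl]

-- an insert-only fold from empty keeps the value at i equal to []
theorem pv_foldl_nil_keep (i : Int) (l : List Int) :
    l.foldl (fun (s : PySem.Set Int) j => if i = j then PySem.Set.empty else s) [] = [] := by
  induction l with
  | nil => rfl
  | cons x tl ih =>
    simp only [List.foldl_cons]
    have h : (if i = x then PySem.Set.empty else ([] : PySem.Set Int)) = [] := by
      split_ifs <;> rfl
    rw [h, ih]

-- keys of A's finished dict are exactly range(n)
theorem pv_keys_eq (n half : Int) :
    ((PySem.List.pyRange 0 n 1).foldl (fun adj u =>
        (PySem.List.pyRange 1 (half + 1) 1).foldl (fun adj d =>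
          pvAddEdge adj u (PySem.Int.mod (u + d) n)) adj)
      ((PySem.List.pyRange 0 n 1).foldl (fun d i => d.insert i PySem.Set.empty)
        PySem.Dict.empty)).keys = PySem.List.pyRange 0 n 1 := by
  have h0 : ((PySem.List.pyRange 0 n 1).foldl (fun d i => d.insert i PySem.Set.empty)
      (PySem.Dict.empty : PySem.Dict Int (PySem.Set Int))).keys = PySem.List.pyRange 0 n 1 := by
    rw [PySem.Dict.keys_foldl_insert _ (fun _ _ => PySem.Set.empty), PySem.Dict.keys_empty,
      PySem.Set.update_nil_left,
      PySem.Set.ofList_eq_self_of_nodup _ (PySem.List.nodup_pyRange_one 0 n)]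
  apply pv_fold_keys _ _ _ _ _ h0
  intro dd u hu hK
  have hub := (PySem.List.mem_pyRange_one).mp hu
  have hn : 0 < n := by omega
  apply pv_fold_keys _ _ _ _ _ hK
  intro dd2 d _ hK2
  have hv0 : 0 ≤ PySem.Int.mod (u + d) n := by
    rw [PySem.Int.mod_eq_emod_of_pos hn]; exact Int.emod_nonneg _ (by omega)
  have hvn : PySem.Int.mod (u + d) n < n := by
    rw [PySem.Int.mod_eq_emod_of_pos hn]; exact Int.emod_lt_of_pos _ hn
  rw [pv_keys_addEdge _ _ _
    (by rw [hK2]; exact (PySem.List.mem_pyRange_one).mpr (by omega))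
    (by rw [hK2]; exact (PySem.List.mem_pyRange_one).mpr (by omega)), hK2]

-- the value at key i of A's finished dict equals B's neighbour set for i
theorem pv_value_eq (n half i : Int) (hi : i ∈ PySem.List.pyRange 0 n 1) :
    ((PySem.List.pyRange 0 n 1).foldl (fun adj u =>
        (PySem.List.pyRange 1 (half + 1) 1).foldl (fun adj d =>
          pvAddEdge adj u (PySem.Int.mod (u + d) n)) adj)
      ((PySem.List.pyRange 0 n 1).foldl (fun d i => d.insert i PySem.Set.empty)
        PySem.Dict.empty)).getD i [] = pvNbrs n half i := by
  have hib := (PySem.List.mem_pyRange_one).mp hi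
  have hn : 0 < n := by omega
  -- push getD through the outer and inner dict folds
  rw [pv_fold_getD i _ _
    (fun s u => (PySem.List.pyRange 1 (half + 1) 1).foldl (fun s d =>
        let v := PySem.Int.mod (u + d) n
        if u = v then s else if i = v then PySem.Set.add s u
        else if i = u then PySem.Set.add s v else s) s)
    (by
      intro dd u _
      rw [pv_fold_getD i _ _
        (fun s d =>
          let v := PySem.Int.mod (u + d) n
          if u = v then s else if i = v then PySem.Set.add s u
          else if i = u then PySem.Set.add s v else s)
        (by intro dd2 d _; exact pv_getD_addEdge dd2 i u (PySem.Int.mod (u + d) n)) dd])]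
  -- the starting value at i is the empty set
  rw [pv_fold_getD i _ _ (fun s j => if i = j then PySem.Set.empty else s)
    (by
      intro dd j _
      rw [PySem.Dict.getD_insert])]
  rw [PySem.Dict.getD_empty, pv_foldl_nil_keep]
  -- split the outer range at i
  rw [PySem.List.pyRange_one_append 0 i n (by omega) (by omega),
    PySem.List.pyRange_one_cons (by omega : i < n), List.foldl_append, List.foldl_cons]
  unfold pvNbrs
  -- stage 1: rows u < i
  have hst1 : ∀ s : PySem.Set Int, (PySem.List.pyRange 0 i 1).foldl (fun s u =>
      (PySem.List.pyRange 1 (half + 1) 1).foldl (fun s d =>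
        let v := PySem.Int.mod (u + d) n
        if u = v then s else if i = v then PySem.Set.add s u
        else if i = u then PySem.Set.add s v else s) s) s
      = (PySem.List.pyRange (max 0 (i - half)) i 1).foldl (fun s u => PySem.Set.add s u) s := by
    intro s
    rw [PySem.List.foldl_congr_mem _ _
      (fun s u => if i - half ≤ u then PySem.Set.add s u else s) s
      (by
        intro acc u hu
        have hub := (PySem.List.mem_pyRange_one).mp hu
        rw [pv_inner_ne n half i u hn (by omega) (by omega) (by omega) (by omega) (by omega)]
        rw [if_pos (by omega : u < i)]
        exact if_congr (by omega) rfl rfl)]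
    exact pv_rangeCondAdd 0 i (i - half) s
  -- stage 3: rows u > i
  have hst3 : ∀ s : PySem.Set Int, (PySem.List.pyRange (i + 1) n 1).foldl (fun s u =>
      (PySem.List.pyRange 1 (half + 1) 1).foldl (fun s d =>
        let v := PySem.Int.mod (u + d) n
        if u = v then s else if i = v then PySem.Set.add s u
        else if i = u then PySem.Set.add s v else s) s) s
      = (PySem.List.pyRange (max (i + 1) (n + i - half)) n 1).foldl (fun s u => PySem.Set.add s u) s := by
    intro s
    rw [PySem.List.foldl_congr_mem _ _
      (fun s u => if n + i - half ≤ u then PySem.Set.add s u else s) s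
      (by
        intro acc u hu
        have hub := (PySem.List.mem_pyRange_one).mp hu
        rw [pv_inner_ne n half i u hn (by omega) (by omega) (by omega) (by omega) (by omega)]
        rw [if_neg (by omega : ¬ (u < i))]
        exact if_congr (by omega) rfl rfl)]
    exact pv_rangeCondAdd (i + 1) n (n + i - half) s
  -- stage 2: the row u = i is B's forward loop
  have hst2 : ∀ s : PySem.Set Int, (PySem.List.pyRange 1 (half + 1) 1).foldl (fun s d =>
        let v := PySem.Int.mod (i + d) n
        if i = v then s else if i = v then PySem.Set.add s i
        else if i = i then PySem.Set.add s v else s) s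
      = (PySem.List.pyRange 1 (half + 1) 1).foldl (fun s d =>
        let v := PySem.Int.mod (i + d) n
        if v ≠ i then PySem.Set.add s v else s) s := by
    intro s
    apply PySem.List.foldl_congr_mem
    intro acc d _
    simp only []
    by_cases h : PySem.Int.mod (i + d) n = i
    · simp [h]
    · simp [h, show ¬ (i = PySem.Int.mod (i + d) n) from fun hh => h hh.symm]
  rw [hst1, hst2, hst3]
  rfl

-- ===== VERDICT (by name: the statement is the Claim_ definition above) =====
theorem ring_lattice_graph_spec : Claim_equal_ring_lattice_graph := by
  intro n k hdom hpre
  unfold Spec_ring_lattice_graph ring_lattice_graph ring_lattice_graph_alt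
  have h0 : ¬ (PySem.Int.mod k 2 ≠ 0) := fun h => h hpre
  rw [if_neg h0, if_neg h0]
  rw [PySem.Dict.items_eq_map_keys _
    (by rw [pv_keys_eq]; exact PySem.List.nodup_pyRange_one 0 n) ([] : PySem.Set Int),
    pv_keys_eq]
  rw [PySem.Dict.items_foldl_insert_fresh _ (fun a => a)
    (fun i => pvNbrs n (PySem.Int.floordiv k 2) i)
    PySem.Dict.empty (by intro a _; exact PySem.Dict.contains_empty a)
    (by simpa using PySem.List.nodup_pyRange_one 0 n)]
  rw [show (PySem.Dict.empty : PySem.Dict Int (PySem.Set Int)).items = [] from rfl,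
    List.nil_append]
  apply List.map_congr_left
  intro i hi
  rw [pv_value_eq n (PySem.Int.floordiv k 2) i hi]
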